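-- pv_equiv track=rewrite | github.com/Bobcatsoap/jy-server | cell/Room6_Test.py | is_two_liandui
-- ===== SOURCE A (Python) =====
-- import copy
--
-- def is_two_liandui(cards):
--     if len(cards) < 6:
--         return False
--     if len(cards) % 2 != 0:
--         return False
--     for card in cards:
--         if cards.count(card) != 2:
--             return False
--     new_cards = copy.deepcopy(cards)
--     new_cards.sort()
--     # 去重
--     for card in new_cards:
--         while new_cards.count(card) != 1:
--             new_cards.remove(card)
--     # 不能包含大小王
--     if new_cards[len(new_cards) - 1] > 15:
--         return False
--
--     for index in range(0, len(new_cards) - 1):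
--         if not new_cards[index] + 1 == new_cards[index + 1]:
--             return False
--     return True
-- ===== SOURCE B (Python) =====
-- def is_two_liandui(cards):
--     if len(cards) < 6 or len(cards) % 2 != 0:
--         return False
--     s = sorted(cards)
--     if s[-1] > 15:
--         return False
--     return _pairs_run(s)
--
-- def _pairs_run(s):
--     if len(s) <= 2:
--         return len(s) == 2 and s[0] == s[1]
--     return s[0] == s[1] and s[2] == s[0] + 1 and _pairs_run(s[2:])
-- ===== Notes on version B (the rewrite author's own statement) =====
-- stated objective: simpler
-- what changed: Replaces A's count-every-card scan plus deepcopy/sort/destructive-dedup plus two more passes with a single sort followed by one structural recursion over the sorted list checking adjacent pairs and +1 steps.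
import Mathlib
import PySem

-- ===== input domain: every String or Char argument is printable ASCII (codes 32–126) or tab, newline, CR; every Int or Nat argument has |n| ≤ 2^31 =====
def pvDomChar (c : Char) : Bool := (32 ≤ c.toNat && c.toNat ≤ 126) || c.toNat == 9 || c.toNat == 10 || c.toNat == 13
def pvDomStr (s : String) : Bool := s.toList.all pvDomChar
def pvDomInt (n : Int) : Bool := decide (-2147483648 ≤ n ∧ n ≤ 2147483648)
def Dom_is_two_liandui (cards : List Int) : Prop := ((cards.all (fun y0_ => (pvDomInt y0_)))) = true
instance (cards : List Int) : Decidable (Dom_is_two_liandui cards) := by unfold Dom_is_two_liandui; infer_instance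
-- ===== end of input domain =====

-- B replaces A's count-every-card scan + deepcopy/sort/destructive dedup + two index passes
-- by one sort followed by a single structural recursion over the sorted list (objective: simpler).
-- Neither implementation mutates its argument (A sorts a deep copy, B uses sorted()).

-- ===== PORT A =====
-- 'while new_cards.count(card) != 1: new_cards.remove(card)'
theorem pvRemoveLen {xs ys : List Int} {c : Int} (h : PySem.List.remove? xs c = some ys) :
    ys.length < xs.length := by
  have hm : c ∈ xs := by
    by_contra hn
    rw [(PySem.List.remove?_eq_none_iff xs c).2 hn] at h
    simp at h
  rw [PySem.List.remove?_eq_some_erase xs c hm] at h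
  cases h
  have h1 := List.length_erase_of_mem hm
  have h2 : 0 < xs.length := List.length_pos_of_mem hm
  omega

def whileRemove (card : Int) (xs : List Int) : List Int :=
  if PySem.List.count xs card ≠ 1 then
    match h : PySem.List.remove? xs card with
    | some ys => whileRemove card ys
    | none => xs   -- Python raises ValueError here; unreachable from A (card is in the list)
  else xs
termination_by xs.length
decreasing_by exact pvRemoveLen h

theorem pvWhileRemoveLen (card : Int) (xs : List Int) :
    (whileRemove card xs).length ≤ xs.length := by
  fun_induction whileRemove card xs with
  | case1 xs hne ys h ih => exact le_trans ih (le_of_lt (pvRemoveLen h))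
  | case2 => exact le_rfl
  | case3 => exact le_rfl

-- 'for card in new_cards: …' over the list being mutated: Python iterates by index
def dedupLoop (i : Nat) (xs : List Int) : List Int :=
  if h : i < xs.length then
    dedupLoop (i + 1) (whileRemove xs[i] xs)
  else xs
termination_by xs.length - i
decreasing_by
  have := pvWhileRemoveLen xs[i] xs
  omega

def is_two_liandui (cards : List Int) : Bool :=
  if cards.length < 6 then false
  else if cards.length % 2 ≠ 0 then false
  else if ¬ (cards.all (fun card => PySem.List.count cards card == 2)) then false
  else
    let new_cards := dedupLoop 0 (PySem.List.sorted cards (fun x => x) false)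
    if PySem.List.pyGetD new_cards ((new_cards.length : Int) - 1) 0 > 15 then false
    else
      (PySem.List.pyRange 0 ((new_cards.length : Int) - 1) 1).all
        (fun index => PySem.List.pyGetD new_cards index 0 + 1 == PySem.List.pyGetD new_cards (index + 1) 0)

-- ===== PORT B =====
def pairsRun (s : List Int) : Bool :=
  if s.length ≤ 2 then
    decide (s.length = 2) && (PySem.List.pyGetD s 0 0 == PySem.List.pyGetD s 1 0)
  else
    (PySem.List.pyGetD s 0 0 == PySem.List.pyGetD s 1 0)
    && (PySem.List.pyGetD s 2 0 == PySem.List.pyGetD s 0 0 + 1)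
    && pairsRun (PySem.List.slice s (some 2) none)
termination_by s.length
decreasing_by
  rw [PySem.List.slice_from _ (by norm_num : (0:Int) ≤ 2)]
  simp
  omega

def is_two_liandui_alt (cards : List Int) : Bool :=
  if cards.length < 6 ∨ cards.length % 2 ≠ 0 then false
  else
    let s := PySem.List.sorted cards (fun x => x) false
    if PySem.List.pyGetD s (-1) 0 > 15 then false
    else pairsRun s

-- ===== PRECONDITION & SPEC =====
def Spec_is_two_liandui (cards : List Int) (out : Bool) : Prop := out = is_two_liandui_alt cards
instance (cards : List Int) (out : Bool) : Decidable (Spec_is_two_liandui cards out) := by unfold Spec_is_two_liandui; infer_instance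

-- ===== CLAIM (what is proved, stated in full; the proofs are below) =====
def Claim_equal_is_two_liandui : Prop := ∀ (cards : List Int), Dom_is_two_liandui cards → Spec_is_two_liandui cards (is_two_liandui cards)

-- ===== LEMMAS AND PROOFS =====

-- each element doubled: [a,b,c] ↦ [a,a,b,b,c,c]
def pairsOf : List Int → List Int
  | [] => []
  | a :: t => a :: a :: pairsOf t

def chainBool : List Int → Bool
  | a :: b :: t => (a + 1 == b) && chainBool (b :: t)
  | _ => true

theorem mem_pairsOf {x : Int} {d : List Int} : x ∈ pairsOf d ↔ x ∈ d := by
  induction d with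
  | nil => simp [pairsOf]
  | cons a t ih => simp [pairsOf, ih]

theorem count_pairsOf (x : Int) (d : List Int) : (pairsOf d).count x = 2 * d.count x := by
  induction d with
  | nil => simp [pairsOf]
  | cons a t ih =>
    by_cases h : a = x
    · simp [pairsOf, h, ih]
      ring
    · simp [pairsOf, h, ih]

theorem length_pairsOf (d : List Int) : (pairsOf d).length = 2 * d.length := by
  induction d with
  | nil => simp [pairsOf]
  | cons a t ih => simp [pairsOf, ih]; ring

-- sorted + every count exactly 2 ⇒ the list is pairsOf of a strictly increasing list
theorem pairs_of_counts : ∀ s : List Int, s.Pairwise (· ≤ ·) →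
    (∀ x ∈ s, s.count x = 2) → ∃ d, s = pairsOf d ∧ d.Pairwise (· < ·) := by
  intro s
  induction hn : s.length using Nat.strong_induction_on generalizing s with
  | _ n ih =>
    match s with
    | [] => exact fun _ _ => ⟨[], rfl, List.Pairwise.nil⟩
    | [a] =>
      intro _ hcnt
      have := hcnt a (by simp)
      simp at this
    | a :: b :: t' =>
      intro hps hcnt
      have hca : (b :: t').count a = 1 := by
        have := hcnt a (by simp)
        simp [List.count_cons] at this ⊢
        omega
      have hba : b = a := by
        by_contra hne
        have hat : a ∈ t' := by
          have h1 : a ∈ b :: t' := List.count_pos_iff.1 (by omega)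
          simpa [Ne.symm hne] using h1
        have h1 : a ≤ b := (List.pairwise_cons.1 hps).1 b (by simp)
        have h2 : b ≤ a := (List.pairwise_cons.1 (List.pairwise_cons.1 hps).2).1 a hat
        omega
      subst hba
      have hat' : b ∉ t' := by
        have h0 : t'.count b = 0 := by
          simp at hca
          omega
        exact List.count_eq_zero.1 h0
      have hpt' : t'.Pairwise (· ≤ ·) :=
        (List.pairwise_cons.1 (List.pairwise_cons.1 hps).2).2
      have hcnt' : ∀ x ∈ t', t'.count x = 2 := by
        intro x hx
        have hxa : ¬ (b = x) := fun he => hat' (he ▸ hx)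
        have := hcnt x (by simp [hx])
        simp [hxa] at this
        omega
      obtain ⟨d', hd1, hd2⟩ := ih t'.length (by simp at hn; omega) t' rfl hpt' hcnt'
      refine ⟨b :: d', by simp [pairsOf, hd1], List.pairwise_cons.2 ⟨?_, hd2⟩⟩
      intro y hy
      have hyt : y ∈ t' := hd1 ▸ mem_pairsOf.2 hy
      have h1 : b ≤ y := (List.pairwise_cons.1 hps).1 y (by simp [hyt])
      have h2 : y ≠ b := fun he => hat' (he ▸ hyt)
      omega

-- pairsRun true ⇒ the list is pairsOf of a nonempty +1-chain
theorem pairsRun_structure : ∀ s : List Int, pairsRun s = true →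
    ∃ d, s = pairsOf d ∧ d ≠ [] ∧ d.IsChain (fun x y => y = x + 1) := by
  intro s
  induction hn : s.length using Nat.strong_induction_on generalizing s with
  | _ n ih =>
    intro hrun
    match s with
    | [] => rw [pairsRun] at hrun; simp at hrun
    | [a] => rw [pairsRun] at hrun; simp at hrun
    | [a, b] =>
      have hab : a = b := by
        rw [pairsRun] at hrun
        simp [pysem] at hrun
        exact hrun
      exact ⟨[a], by simp [pairsOf, hab], by simp, by simp⟩
    | a :: b :: c :: t' =>
      rw [pairsRun] at hrun
      rw [if_neg (by simp)] at hrun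
      rw [PySem.List.slice_from _ (by norm_num : (0:Int) ≤ 2)] at hrun
      rw [show ((2:Int)).toNat = 2 from rfl] at hrun
      simp only [List.drop_succ_cons, List.drop_zero] at hrun
      have h0 : PySem.List.pyGetD (a :: b :: c :: t') 0 0 = a := by
        simp [pysem]
      have h1 : PySem.List.pyGetD (a :: b :: c :: t') 1 0 = b := by
        simp [pysem]
      have h2 : PySem.List.pyGetD (a :: b :: c :: t') 2 0 = c := by
        simp [pysem]
      rw [h0, h1, h2] at hrun
      simp only [Bool.and_eq_true, beq_iff_eq] at hrun
      obtain ⟨⟨hab, hc⟩, hrest⟩ := hrun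
      obtain ⟨d', hd1, hd2, hd3⟩ := ih (c :: t').length (by simp at hn ⊢; omega) _ rfl hrest
      have hhead : ∃ e', d' = (a + 1) :: e' := by
        match d' with
        | [] => exact absurd rfl hd2
        | e :: e' =>
          have hce : c = e := by simpa [pairsOf] using congrArg (fun l => l.headD 0) hd1
          refine ⟨e', ?_⟩
          rw [hce] at hc
          rw [← hc]
      obtain ⟨e', he⟩ := hhead
      refine ⟨a :: d', by simp [pairsOf, ← hd1, hab], by simp, ?_⟩
      rw [he]
      exact List.isChain_cons_cons.2 ⟨rfl, he ▸ hd3⟩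

-- pairsRun on a doubled chain is the chain check
theorem pairsRun_pairsOf : ∀ d : List Int, d ≠ [] → pairsRun (pairsOf d) = chainBool d := by
  intro d
  induction d with
  | nil => intro h; exact absurd rfl h
  | cons a t ih =>
    intro _
    match t with
    | [] =>
      rw [pairsRun]
      simp [pysem, pairsOf, chainBool]
    | b :: t' =>
      rw [pairsRun]
      rw [if_neg (by simp [pairsOf, length_pairsOf])]
      rw [PySem.List.slice_from _ (by norm_num : (0:Int) ≤ 2)]
      have hd : pairsOf (a :: b :: t') = a :: a :: pairsOf (b :: t') := rfl
      rw [hd]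
      rw [show ((2:Int)).toNat = 2 from rfl]
      simp only [List.drop_succ_cons, List.drop_zero]
      have h0 : PySem.List.pyGetD (a :: a :: pairsOf (b :: t')) 0 0 = a := by
        simp [pysem]
      have h1 : PySem.List.pyGetD (a :: a :: pairsOf (b :: t')) 1 0 = a := by
        simp [pysem]
      have h2 : PySem.List.pyGetD (a :: a :: pairsOf (b :: t')) 2 0 = b := by
        simp [pysem, pairsOf]
      rw [h0, h1, h2, ih (by simp)]
      have hsym : (b == a + 1) = (a + 1 == b) := by
        rcases eq_or_ne (a + 1) b with h | h
        · simp [h]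
        · simp [h, h.symm]
      simp [chainBool, hsym]

-- the while-loop removes the duplicate of the doubled head
theorem whileRemove_step (a : Int) (pre rest : List Int)
    (hpre : a ∉ pre) (hrest : a ∉ rest) :
    whileRemove a (pre ++ a :: a :: rest) = pre ++ a :: rest := by
  have hc2 : PySem.List.count (pre ++ a :: a :: rest) a = 2 := by
    simp [PySem.List.count_eq, List.count_append,
      List.count_eq_zero.2 hpre, List.count_eq_zero.2 hrest]
  have hmem : a ∈ pre ++ a :: a :: rest := by simp
  have herase : (pre ++ a :: a :: rest).erase a = pre ++ a :: rest := by
    rw [List.erase_append_right _ hpre, List.erase_cons_head]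
  have hc1 : PySem.List.count (pre ++ a :: rest) a = 1 := by
    simp [PySem.List.count_eq, List.count_append,
      List.count_eq_zero.2 hpre, List.count_eq_zero.2 hrest]
  rw [whileRemove, if_pos (by rw [hc2]; omega)]
  split
  case _ ys h =>
    rw [PySem.List.remove?_eq_some_erase _ a hmem, herase] at h
    cases h
    rw [whileRemove, if_neg (by rw [hc1]; simp)]
  case _ h =>
    exact absurd hmem ((PySem.List.remove?_eq_none_iff _ a).1 h)

-- the dedup loop turns pre ++ pairsOf d into pre ++ d
theorem dedupLoop_pairs : ∀ d pre : List Int, (pre ++ d).Pairwise (· < ·) →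
    dedupLoop pre.length (pre ++ pairsOf d) = pre ++ d := by
  intro d
  induction d with
  | nil =>
    intro pre _
    rw [dedupLoop, dif_neg (by simp [pairsOf])]
    simp [pairsOf]
  | cons a t ih =>
    intro pre hpw
    have hpa : a ∉ pre := by
      intro hmem
      have := (List.pairwise_append.1 hpw).2.2 a hmem a (by simp)
      omega
    have hta : a ∉ t := by
      intro hmem
      have := (List.pairwise_cons.1 (List.pairwise_append.1 hpw).2.1).1 a hmem
      omega
    have hlt : pre.length < (pre ++ pairsOf (a :: t)).length := by
      simp [pairsOf]
    have hget : (pre ++ pairsOf (a :: t))[pre.length]'hlt = a := by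
      rw [List.getElem_append_right (by omega)]
      simp [pairsOf]
    rw [dedupLoop, dif_pos hlt, hget]
    have hwr : whileRemove a (pre ++ pairsOf (a :: t)) = pre ++ a :: pairsOf t := by
      have he : pre ++ pairsOf (a :: t) = pre ++ a :: a :: pairsOf t := by simp [pairsOf]
      rw [he]
      exact whileRemove_step a pre (pairsOf t) hpa (fun h => hta (mem_pairsOf.1 h))
    rw [hwr]
    have hassoc : pre ++ a :: pairsOf t = (pre ++ [a]) ++ pairsOf t := by simp
    have hlen : pre.length + 1 = (pre ++ [a]).length := by simp
    rw [hassoc, hlen, ih (pre ++ [a]) (by simpa using hpw)]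
    simp

theorem getLast?_pairsOf (d : List Int) : (pairsOf d).getLast? = d.getLast? := by
  induction d with
  | nil => simp [pairsOf]
  | cons a t ih =>
    match t with
    | [] => simp [pairsOf]
    | b :: t' =>
      have h : pairsOf (a :: b :: t') = a :: a :: b :: b :: pairsOf t' := rfl
      rw [h]
      have h2 : pairsOf (b :: t') = b :: b :: pairsOf t' := rfl
      rw [h2] at ih
      simp only [List.getLast?_cons_cons]
      simpa using ih

-- the Nat form of A's final index loop
theorem natAll_chain : ∀ d : List Int,
    ((List.range (d.length - 1)).all fun k => d.getD k 0 + 1 == d.getD (k + 1) 0)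
      = chainBool d := by
  intro d
  induction d with
  | nil => simp [chainBool]
  | cons a t ih =>
    match t with
    | [] => simp [chainBool]
    | b :: t' =>
      have hl : (a :: b :: t').length - 1 = ((b :: t').length - 1) + 1 := by simp
      rw [hl, List.range_succ_eq_map]
      simp only [List.all_cons, List.all_map, Function.comp_def, Nat.succ_eq_add_one]
      have hsh : ∀ k : Nat, (a :: b :: t').getD (k + 1) 0 = (b :: t').getD k 0 := by
        intro k; simp
      simp only [hsh, List.getD_cons_zero]
      rw [ih]
      simp [chainBool]

-- A's final index loop is the chain check
theorem rangeAll_chain (d : List Int) :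
    ((PySem.List.pyRange 0 ((d.length : Int) - 1) 1).all
      (fun index => PySem.List.pyGetD d index 0 + 1 == PySem.List.pyGetD d (index + 1) 0))
    = chainBool d := by
  rw [PySem.List.pyRange_one]
  simp only [List.all_map]
  have heq : (fun k : Nat => PySem.List.pyGetD d ((0 : Int) + (k : Int)) 0 + 1 ==
        PySem.List.pyGetD d ((0 : Int) + (k : Int) + 1) 0)
      = (fun k : Nat => d.getD k 0 + 1 == d.getD (k + 1) 0) := by
    funext k
    have hb : (0 : Int) + (k : Int) = (k : Int) := by omega
    have h1 : ((k : Int) + 1) = ((k + 1 : Nat) : Int) := by push_cast; ring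
    rw [hb, h1, PySem.List.pyGetD_natCast, PySem.List.pyGetD_natCast]
  have hlen : (((d.length : Int) - 1 - 0).toNat) = d.length - 1 := by omega
  rw [show ((fun index => PySem.List.pyGetD d index 0 + 1 ==
        PySem.List.pyGetD d (index + 1) 0) ∘ fun k : Nat => (0 : Int) + (k : Int))
      = (fun k : Nat => d.getD k 0 + 1 == d.getD (k + 1) 0) from heq]
  rw [hlen]
  exact natAll_chain d

-- main equality (unconditional)
theorem pv_main (cards : List Int) : is_two_liandui cards = is_two_liandui_alt cards := by
  unfold is_two_liandui is_two_liandui_alt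
  by_cases h6 : cards.length < 6
  · simp [h6]
  by_cases h2 : cards.length % 2 ≠ 0
  · simp [h6, h2]
  rw [if_neg h6, if_neg h2]
  rw [if_neg (show ¬(cards.length < 6 ∨ cards.length % 2 ≠ 0) by
    rw [not_or]; exact ⟨h6, h2⟩)]
  set s := PySem.List.sorted cards (fun x => x) false with hs
  have hperm : s.Perm cards := PySem.List.sorted_perm cards (fun x => x) false
  have hpw : s.Pairwise (· ≤ ·) := PySem.List.sorted_pairwise cards (fun x => x)
  have hslen : s.length = cards.length := hperm.length_eq
  have hsne : s ≠ [] := by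
    intro h
    rw [h] at hslen
    simp at hslen
    omega
  by_cases hcnt : ∀ x ∈ cards, cards.count x = 2
  · -- all counts are 2: both sides reduce to the chain check on the doubled list
    have hall : (cards.all fun card => PySem.List.count cards card == 2) = true := by
      simp only [List.all_eq_true, PySem.List.count_eq, beq_iff_eq]
      exact hcnt
    rw [if_neg (not_not_intro hall)]
    dsimp only

    have hcnts : ∀ x ∈ s, s.count x = 2 := by
      intro x hx
      rw [hperm.count_eq]
      exact hcnt x (hperm.mem_iff.1 hx)
    obtain ⟨d, hd, hdpw⟩ := pairs_of_counts s hpw hcnts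
    have hdne : d ≠ [] := by
      intro h
      rw [h] at hd
      exact hsne (by simp [hd, pairsOf])
    have hded : dedupLoop 0 s = d := by
      rw [hd]
      have := dedupLoop_pairs d [] (by simpa using hdpw)
      simpa using this
    simp only [hded]
    have hdl : 0 < d.length := List.length_pos_iff.2 hdne
    have hlastA : PySem.List.pyGetD d ((d.length : Int) - 1) 0 = d.getLast hdne := by
      rw [PySem.List.pyGetD_eq_getElem d 0 (by omega) (by omega)]
      rw [List.getLast_eq_getElem hdne]
      congr 1
      omega
    have hlastB : PySem.List.pyGetD s (-1) 0 = d.getLast hdne := by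
      rw [PySem.List.pyGetD_neg_one s 0 hsne]
      have h1 : s.getLast? = d.getLast? := by rw [hd]; exact getLast?_pairsOf d
      rw [List.getLast?_eq_some_getLast hsne, List.getLast?_eq_some_getLast hdne] at h1
      exact Option.some.inj h1
    rw [hlastA, hlastB]
    by_cases hgt : d.getLast hdne > 15
    · rw [if_pos hgt, if_pos hgt]
    · rw [if_neg hgt, if_neg hgt, rangeAll_chain d, hd, pairsRun_pairsOf d hdne]
  · -- some count is not 2: A fails the count scan, B fails the pair structure
    rw [if_pos (show ¬(cards.all fun card => PySem.List.count cards card == 2) = true by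
      intro hall
      exact hcnt (by
        intro x hx
        have := List.all_eq_true.1 hall x hx
        simpa [PySem.List.count_eq] using this))]
    dsimp only
    have hx : ∃ x ∈ cards, cards.count x ≠ 2 := by
      by_contra hcon
      push Not at hcon
      exact hcnt hcon
    obtain ⟨x0, hx0m, hx0c⟩ := hx
    have hpr : pairsRun s = false := by
      by_contra h
      have htrue : pairsRun s = true := by
        revert h
        cases pairsRun s <;> simp
      obtain ⟨d, hd, hdne, hchain⟩ := pairsRun_structure s htrue
      have hnd : d.Nodup :=
        (List.isChain_iff_pairwise.1
          (hchain.imp (fun {p q} hpq => by omega : ∀ {p q : Int}, q = p + 1 → p < q))).nodup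
      have hx0s : x0 ∈ s := hperm.mem_iff.2 hx0m
      have hx0d : x0 ∈ d := mem_pairsOf.1 (hd ▸ hx0s)
      have : cards.count x0 = 2 := by
        rw [← hperm.count_eq, hd, count_pairsOf, List.count_eq_one_of_mem hnd hx0d]
      exact hx0c this
    by_cases hgt : PySem.List.pyGetD s (-1) 0 > 15
    · rw [if_pos hgt]
    · rw [if_neg hgt, hpr]

-- ===== VERDICT (by name: the statement is the Claim_ definition above) =====
theorem is_two_liandui_spec : Claim_equal_is_two_liandui := by
  intro cards _
  unfold Spec_is_two_liandui
  exact pv_main cards
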